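-- pv_equiv track=rewrite | github.com/aimclub/documentor | documentor/processing/parsers/docx/caption_finder.py | extract_table_structure_from_xml
-- ===== SOURCE A (Python) =====
-- from typing import Dict, List, Any, Optional
--
-- def extract_table_structure_from_xml(docx_table: Dict[str, Any]) -> Optional[List[str]]:
--     """
--     Extracts table structure (top row/headers) from XML table.
--
--     Args:
--         docx_table: Table data from XML parser
--
--     Returns:
--         List of header cell texts (first row) or None
--     """
--     table_data = docx_table.get('data', [])
--     if not table_data:
--         return None
--
--     # Get first row as headers
--     first_row = table_data[0] if table_data else []
--     # Keep all cells (including empty ones) to preserve structure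
--     # But filter out trailing empty cells
--     headers = []
--     last_non_empty = -1
--     for i, cell in enumerate(first_row):
--         cell_text = cell.strip() if cell else ""
--         headers.append(cell_text)
--         if cell_text:
--             last_non_empty = i
--
--     # Remove trailing empty cells
--     if last_non_empty >= 0:
--         headers = headers[:last_non_empty + 1]
--
--     # Return only if we have at least some non-empty headers
--     if any(h for h in headers):
--         return headers
--
--     return None
-- ===== SOURCE B (Python) =====
-- def extract_table_structure_from_xml(docx_table):
--     """Same extraction, done declaratively: strip the first row in one
--     comprehension, trim trailing empties with a reverse-pop loop, and let
--     the list's own truthiness decide between it and None."""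
--     rows = docx_table.get('data', [])
--     if not rows:
--         return None
--     stripped = [c.strip() if c else "" for c in rows[0]]
--     while stripped and not stripped[-1]:
--         stripped.pop()
--     return stripped or None
-- ===== Notes on version B (the rewrite author's own statement) =====
-- stated objective: simpler
-- what changed: Replaces the index-tracking accumulation loop (last_non_empty + slice + any-scan) with a map comprehension, a reverse trim of trailing empties, and the list's truthiness as the final test.
import Mathlib
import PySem

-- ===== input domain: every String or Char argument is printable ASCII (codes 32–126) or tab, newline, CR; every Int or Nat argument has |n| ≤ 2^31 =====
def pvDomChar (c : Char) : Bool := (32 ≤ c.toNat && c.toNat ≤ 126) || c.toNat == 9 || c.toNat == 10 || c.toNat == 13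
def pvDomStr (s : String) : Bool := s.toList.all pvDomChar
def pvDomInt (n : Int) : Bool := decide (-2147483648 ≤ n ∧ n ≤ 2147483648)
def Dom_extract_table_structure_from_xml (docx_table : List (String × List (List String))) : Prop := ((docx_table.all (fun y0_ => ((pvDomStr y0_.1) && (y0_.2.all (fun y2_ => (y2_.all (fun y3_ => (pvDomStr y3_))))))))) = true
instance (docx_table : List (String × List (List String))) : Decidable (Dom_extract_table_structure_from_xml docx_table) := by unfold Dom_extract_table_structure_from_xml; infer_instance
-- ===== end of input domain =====

-- ===== PORT A =====
-- A's accumulation loop: carries (headers, last_non_empty) and the running index i.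
def pvLoopA : List String → List String → Int → Int → (List String × Int)
  | [], headers, last, _ => (headers, last)
  | cell :: rest, headers, last, i =>
      let cell_text := if cell ≠ "" then PySem.Str.strip cell else ""
      let headers' := headers ++ [cell_text]
      let last' := if cell_text ≠ "" then i else last
      pvLoopA rest headers' last' (i + 1)

def extract_table_structure_from_xml (docx_table : List (String × List (List String))) : Option (List String) :=
  let table_data := PySem.Dict.getD (PySem.Dict.mk docx_table) "data" []
  if table_data = [] then none
  else
    let first_row := if table_data ≠ [] then table_data.headD [] else []
    let st := pvLoopA first_row [] (-1) 0
    let headers := if st.2 ≥ 0 then PySem.List.slice st.1 none (some (st.2 + 1)) else st.1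
    if headers.any (fun h => h ≠ "") then some headers else none

-- ===== PORT B =====
-- B's while-pop loop: drop trailing empty cells (pop from the end while empty).
def pvTrimTrail (xs : List String) : List String :=
  ((xs.reverse.dropWhile (fun s => s = "")).reverse)

def extract_table_structure_from_xml_alt (docx_table : List (String × List (List String))) : Option (List String) :=
  let rows := PySem.Dict.getD (PySem.Dict.mk docx_table) "data" []
  if rows = [] then none
  else
    let stripped := rows.headD [] |>.map (fun c => if c ≠ "" then PySem.Str.strip c else "")
    let trimmed := pvTrimTrail stripped
    if trimmed = [] then none else some trimmed

-- ===== PRECONDITION & SPEC =====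
def Spec_extract_table_structure_from_xml (docx_table : List (String × List (List String))) (out : Option (List String)) : Prop := out = extract_table_structure_from_xml_alt docx_table
instance (docx_table : List (String × List (List String))) (out : Option (List String)) : Decidable (Spec_extract_table_structure_from_xml docx_table out) := by unfold Spec_extract_table_structure_from_xml; infer_instance

-- ===== CLAIM =====
def Claim_equal_extract_table_structure_from_xml : Prop := ∀ (docx_table : List (String × List (List String))), Dom_extract_table_structure_from_xml docx_table → Spec_extract_table_structure_from_xml docx_table (extract_table_structure_from_xml docx_table)

-- ===== LEMMAS AND PROOFS (verdict theorem at the bottom) =====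
def pvF (c : String) : String := if c ≠ "" then PySem.Str.strip c else ""

lemma pvTrim_cons (x : String) (xs : List String) :
    pvTrimTrail (x :: xs) =
      if pvTrimTrail xs = [] then (if x = "" then [] else [x]) else x :: pvTrimTrail xs := by
  unfold pvTrimTrail
  simp only [List.reverse_cons, List.dropWhile_append]
  by_cases h : (xs.reverse.dropWhile (fun s => s = "")) = []
  · simp [h]
    by_cases hx : x = "" <;> simp [hx, List.dropWhile]
  · simp [h, List.isEmpty_iff]

lemma pvTrim_prefix (xs : List String) : ∃ t, xs = pvTrimTrail xs ++ t ∧ ∀ s ∈ t, s = "" := by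
  unfold pvTrimTrail
  refine ⟨(xs.reverse.takeWhile (fun s => s = "")).reverse, ?_, ?_⟩
  · rw [← List.reverse_append, List.takeWhile_append_dropWhile, List.reverse_reverse]
  · intro s hs
    have := List.mem_takeWhile_imp (List.mem_reverse.mp hs)
    simpa using this

lemma pvTrim_eq_nil_iff (xs : List String) : pvTrimTrail xs = [] ↔ ∀ s ∈ xs, s = "" := by
  unfold pvTrimTrail
  simp [List.dropWhile_eq_nil_iff]

-- The loop returns (map pvF l, j + length of trimmed − 1) (or the initial last if all empty).
lemma pvLoopA_spec (l : List String) (acc : List String) (last : Int) (j : Int) :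
    pvLoopA l acc last j =
      (acc ++ l.map pvF,
       if pvTrimTrail (l.map pvF) = [] then last else j + (pvTrimTrail (l.map pvF)).length - 1) := by
  induction l generalizing acc last j with
  | nil => simp [pvLoopA, pvTrimTrail]
  | cons c rest ih =>
      rw [pvLoopA, ih]
      have hfc : (if c ≠ "" then PySem.Str.strip c else "") = pvF c := rfl
      rw [hfc]
      simp only [List.map_cons, pvTrim_cons, Prod.mk.injEq]
      refine ⟨by simp [pvF], ?_⟩
      by_cases hr : pvTrimTrail (rest.map pvF) = []
      · by_cases hc : pvF c = ""
        · simp [hr, hc]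
        · simp [hr, hc]
      · have hcons : (pvF c :: pvTrimTrail (rest.map pvF)) ≠ [] := by simp
        simp only [hr, ite_false, hcons, List.length_cons]
        push_cast
        ring

theorem extract_table_structure_from_xml_spec : Claim_equal_extract_table_structure_from_xml := by
  intro docx_table _
  unfold Spec_extract_table_structure_from_xml extract_table_structure_from_xml extract_table_structure_from_xml_alt
  set td := PySem.Dict.getD (PySem.Dict.mk docx_table) "data" ([] : List (List String)) with htd
  by_cases h0 : td = []
  · simp [h0]
  · have hfun : (fun c : String => if c ≠ "" then PySem.Str.strip c else "") = pvF := rfl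
    simp only [h0, ite_false, hfun, ne_eq, not_false_iff, if_pos]
    rw [pvLoopA_spec]
    set m := (td.headD ([] : List String)).map pvF with hm
    by_cases ht : pvTrimTrail m = []
    · -- all cells empty: A's last stays -1, no header is non-empty, both sides give none
      have hall : ∀ s ∈ m, s = "" := (pvTrim_eq_nil_iff m).mp ht
      simp only [ht, ite_true, List.nil_append]
      rw [if_neg (by norm_num : ¬((-1:Int) ≥ 0))]
      have hany : m.any (fun h => decide ¬h = "") = false := by
        simp only [List.any_eq_false]
        intro x hx
        simp [hall x hx]
      rw [hany]
      simp
    · -- some non-empty cell: A slices headers down to exactly the trimmed list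
      obtain ⟨t, hsplit, htail⟩ := pvTrim_prefix m
      have hlen : 0 < (pvTrimTrail m).length := List.length_pos_iff.mpr ht
      simp only [if_neg ht, List.nil_append]
      rw [if_pos (by omega : (0:Int) + (pvTrimTrail m).length - 1 ≥ 0)]
      have hidx : (0:Int) + (pvTrimTrail m).length - 1 + 1 = ((pvTrimTrail m).length : Int) := by
        ring
      rw [hidx, PySem.List.slice_to_natCast]
      have htake : m.take (pvTrimTrail m).length = pvTrimTrail m := by
        nth_rewrite 2 [hsplit]
        exact List.take_left
      rw [htake]
      have hlast : ∃ s ∈ pvTrimTrail m, s ≠ "" := by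
        by_contra hno
        push Not at hno
        exact ht ((pvTrim_eq_nil_iff m).mpr (by
          intro s hs
          rw [hsplit] at hs
          rcases List.mem_append.mp hs with h | h
          · exact hno s h
          · exact htail s h))
      obtain ⟨s, hs, hne⟩ := hlast
      have hany : (pvTrimTrail m).any (fun h => decide ¬h = "") = true := by
        simp only [List.any_eq_true]
        exact ⟨s, hs, by simp [hne]⟩
      rw [hany]
      simp
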